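-- pv_equiv track=rewrite | github.com/1Mr12/ProplemSolveing | hackerRank/sortNestedArray2depth.py | findTheSecondLower
-- ===== SOURCE A (Python) =====
-- def findTheSecondLower(sortedRecords):
--     result = []
--     start = False # True if you removed the duplicated first one
--     firstLow = sortedRecords[0] # first element of the array
--     for x in sortedRecords[1:]:
--         if firstLow[1] == x[1]:
--             if start: # if start = True then you start the work
--                 result.append(x[0])
--             else:
--                 continue
--         elif x[1] > firstLow[1] and not start: # Find the first lowwer
--             firstLow = x
--             start =True
--             result.append(x[0])
--     else:
--         return result # after you finsh the loop
-- ===== SOURCE B (Python) =====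
-- def findTheSecondLower(sortedRecords):
--     v0 = sortedRecords[0][1]
--     groups = {}
--     for name, val in sortedRecords[1:]:
--         groups[val] = groups.get(val, []) + [name]
--     for val, names in groups.items():
--         if val > v0:
--             return names
--     return []
-- ===== Notes on version B (the rewrite author's own statement) =====
-- stated objective: alternative
-- what changed: Replaced A's single stateful scan with a start-flag state machine by a dict-based grouping: one pass builds an insertion-ordered dict mapping each value in the tail to its list of names, then the answer is the name list of the first dict key exceeding the head's value.
import Mathlib
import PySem

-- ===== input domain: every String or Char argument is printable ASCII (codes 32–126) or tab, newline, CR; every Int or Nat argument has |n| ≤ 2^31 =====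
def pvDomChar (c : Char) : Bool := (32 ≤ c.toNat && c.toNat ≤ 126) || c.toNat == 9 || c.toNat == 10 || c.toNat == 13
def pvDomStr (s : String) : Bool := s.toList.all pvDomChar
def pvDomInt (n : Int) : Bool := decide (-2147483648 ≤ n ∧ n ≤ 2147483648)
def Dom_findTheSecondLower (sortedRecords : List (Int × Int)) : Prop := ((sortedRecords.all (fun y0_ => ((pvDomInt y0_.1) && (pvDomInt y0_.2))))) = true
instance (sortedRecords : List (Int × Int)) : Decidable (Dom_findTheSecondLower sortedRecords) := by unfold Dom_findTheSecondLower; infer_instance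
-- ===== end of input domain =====

-- B replaces A's stateful start-flag scan by a dict grouping values to name lists plus a scan of the dict items; return values only.

-- ===== PORT A =====
-- the for-loop over sortedRecords[1:] with state (result, start, firstLow)
def findTheSecondLowerLoop (xs : List (Int × Int)) (result : List Int) (start : Bool)
    (firstLow : Int × Int) : List Int :=
  match xs with
  | [] => result
  | x :: rest =>
    if firstLow.2 == x.2 then
      if start then findTheSecondLowerLoop rest (result ++ [x.1]) start firstLow
      else findTheSecondLowerLoop rest result start firstLow
    else if x.2 > firstLow.2 && !start then
      findTheSecondLowerLoop rest (result ++ [x.1]) true x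
    else findTheSecondLowerLoop rest result start firstLow

def findTheSecondLower (sortedRecords : List (Int × Int)) : List Int :=
  match sortedRecords with
  | [] => []  -- Python raises IndexError on sortedRecords[0]; excluded by Pre_
  | firstLow :: tail => findTheSecondLowerLoop tail [] false firstLow

-- ===== PORT B =====
-- groups[val] = groups.get(val, []) + [name], over the tail
def altGroups (xs : List (Int × Int)) : PySem.Dict Int (List Int) :=
  xs.foldl (fun d p => d.modify p.2 [] (fun l => l ++ [p.1])) PySem.Dict.empty

-- for val, names in groups.items(): if val > v0: return names
def altSearch (v0 : Int) (items : List (Int × List Int)) : List Int :=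
  match items with
  | [] => []
  | (v, names) :: rest => if v > v0 then names else altSearch v0 rest

def findTheSecondLower_alt (sortedRecords : List (Int × Int)) : List Int :=
  match sortedRecords with
  | [] => []  -- Python raises IndexError here too; excluded by Pre_
  | r0 :: tail => altSearch r0.2 (altGroups tail).items

-- ===== PRECONDITION & SPEC =====
-- both programs raise IndexError on the empty list (sortedRecords[0])
def Pre_findTheSecondLower (sortedRecords : List (Int × Int)) : Prop := sortedRecords ≠ []
instance (sortedRecords : List (Int × Int)) : Decidable (Pre_findTheSecondLower sortedRecords) := by
  unfold Pre_findTheSecondLower; infer_instance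
def pvWitness_findTheSecondLower : (List (Int × Int)) := [(1, 5), (2, 5), (3, 7), (4, 7), (5, 9)]

def Spec_findTheSecondLower (sortedRecords : List (Int × Int)) (out : List Int) : Prop := out = findTheSecondLower_alt sortedRecords
instance (sortedRecords : List (Int × Int)) (out : List Int) : Decidable (Spec_findTheSecondLower sortedRecords out) := by unfold Spec_findTheSecondLower; infer_instance

-- ===== CLAIM (what is proved, stated in full; the proofs are below) =====
def Claim_equal_findTheSecondLower : Prop := ∀ (sortedRecords : List (Int × Int)), Dom_findTheSecondLower sortedRecords → Pre_findTheSecondLower sortedRecords → Spec_findTheSecondLower sortedRecords (findTheSecondLower sortedRecords)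

-- ===== LEMMAS AND PROOFS =====

-- the common reference form: first record of the tail with value > v0, then ALL names of that value in the tail
def refSpec (v0 : Int) (tail : List (Int × Int)) : List Int :=
  match tail.find? (fun p => decide (v0 < p.2)) with
  | none => []
  | some x => (tail.filter (fun p => p.2 == x.2)).map (fun p => p.1)

-- ---- A-side ----

-- phase 2: once start = true, the loop appends exactly the names of the records equal to firstLow.2
theorem loop_started (xs : List (Int × Int)) (acc : List Int) (f : Int × Int) :
    findTheSecondLowerLoop xs acc true f
      = acc ++ (xs.filter (fun p => p.2 == f.2)).map (fun p => p.1) := by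
  induction xs generalizing acc with
  | nil => simp [findTheSecondLowerLoop]
  | cons x rest ih =>
    by_cases h : f.2 = x.2
    · simp [findTheSecondLowerLoop, h, ih]
    · have h' : ¬ x.2 = f.2 := fun e => h e.symm
      simp [findTheSecondLowerLoop, h, h', ih]

-- phase 1: the unstarted loop computes refSpec
theorem loop_unstarted (xs : List (Int × Int)) (f : Int × Int) :
    findTheSecondLowerLoop xs [] false f = refSpec f.2 xs := by
  induction xs generalizing f with
  | nil => rfl
  | cons x rest ih =>
    by_cases h2 : f.2 < x.2
    · have h : ¬ f.2 = x.2 := by omega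
      simp only [findTheSecondLowerLoop, beq_iff_eq, h, if_false, gt_iff_lt, h2, decide_true,
        Bool.not_false, Bool.and_self, if_true, refSpec, List.find?_cons, List.nil_append]
      rw [loop_started]
      have hfun : (fun p : Int × Int => p.2 == x.2) = (fun p => x.2 == p.2) := by
        funext p; by_cases hp : p.2 = x.2
        · simp [hp]
        · have : ¬ x.2 = p.2 := fun e => hp e.symm
          simp [hp, this]
      simp [hfun]
    · -- x is skipped by A (value = f.2 or < f.2); refSpec also ignores it: x fails the
      -- find?, and if a later y is found then y.2 > f.2 ≥ x.2, so the filter skips x too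
      have hda : decide (f.2 < x.2) = false := by simp [h2]
      have lhs_eq : findTheSecondLowerLoop (x :: rest) [] false f
          = findTheSecondLowerLoop rest [] false f := by
        by_cases h : f.2 = x.2
        · simp [findTheSecondLowerLoop, h]
        · have hgt : ¬ x.2 > f.2 := by omega
          simp [findTheSecondLowerLoop, h, hgt]
      rw [lhs_eq, ih]
      unfold refSpec
      rw [List.find?_cons_of_neg (by simp [h2])]
      cases hf : rest.find? (fun p => decide (f.2 < p.2)) with
      | none => simp
      | some y =>
        have hy : f.2 < y.2 := by simpa using List.find?_some hf
        have hne : (x.2 == y.2) = false := by simp; omega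
        simp [hne]

-- ---- B-side ----

-- the grouping dict looked up at a value yields exactly the names with that value, in order
theorem altGroups_getD (xs : List (Int × Int)) (k : Int) :
    (altGroups xs).getD k [] = (xs.filter (fun p => p.2 == k)).map (fun p => p.1) := by
  unfold altGroups
  have h : xs.foldl (fun d p => d.modify p.2 [] (fun l => l ++ [p.1])) PySem.Dict.empty
      = (xs.map (fun p : Int × Int => (p.2, p.1))).foldl
          (fun d q => d.modify q.1 [] (fun l => l ++ [q.2])) PySem.Dict.empty := by
    rw [List.foldl_map]
  rw [h, PySem.Dict.getD_foldl_modify_append]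
  simp [List.filter_map, Function.comp_def, List.map_map]

-- keys of the grouping dict = ordered dedup of the values
theorem altGroups_keys (xs : List (Int × Int)) :
    (altGroups xs).keys = PySem.List.dedup (xs.map (fun p => p.2)) := by
  unfold altGroups
  rw [PySem.Dict.keys_foldl_modify_key]
  simp [PySem.Set.update, PySem.Set.ofList, PySem.Dict.keys_empty]

theorem altGroups_nodup_keys (xs : List (Int × Int)) : (altGroups xs).keys.Nodup := by
  rw [altGroups_keys]; exact PySem.List.nodup_dedup _

-- scanning a list of (key, g key) pairs for the first key > v0
theorem altSearch_map (v0 : Int) (ks : List Int) (g : Int → List Int) :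
    altSearch v0 (ks.map (fun k => (k, g k)))
      = match ks.find? (fun k => decide (v0 < k)) with
        | none => []
        | some k => g k := by
  induction ks with
  | nil => rfl
  | cons k rest ih =>
    by_cases h : v0 < k
    · simp [altSearch, h]
    · simp only [List.map_cons, altSearch, gt_iff_lt, h, if_false, ih]
      rw [List.find?_cons_of_neg (by simp [h])]

-- PySem.Set.add on either side of membership
theorem set_add_mem (s : List Int) (v : Int) (h : v ∈ s) : PySem.Set.add s v = s := by
  simp [PySem.Set.add, h]

theorem set_add_not_mem (s : List Int) (v : Int) (h : v ∉ s) :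
    PySem.Set.add s v = s ++ [v] := by
  simp [PySem.Set.add, h]

-- find? on a foldl-built Set is unchanged once a hit is in the accumulator
theorem find?_foldl_add_of_isSome {p : Int → Bool} (vs : List Int) (s : List Int)
    (h : (s.find? p).isSome) :
    ((vs.foldl PySem.Set.add s).find? p) = s.find? p := by
  induction vs generalizing s with
  | nil => rfl
  | cons v rest ih =>
    simp only [List.foldl_cons]
    by_cases hc : v ∈ s
    · rw [set_add_mem s v hc]; exact ih s h
    · have hsv : (s ++ [v]).find? p = s.find? p := by
        rw [List.find?_append]
        cases hs : s.find? p with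
        | none => rw [hs] at h; simp at h
        | some a => simp
      rw [set_add_not_mem s v hc, ih (s ++ [v]) (by rw [hsv]; exact h), hsv]

-- find? over the ordered dedup = find? over the original list
theorem find?_dedup (p : Int → Bool) (vs : List Int) :
    (PySem.List.dedup vs).find? p = vs.find? p := by
  rw [show PySem.List.dedup vs = vs.foldl PySem.Set.add [] by simp [PySem.Set.ofList]]
  suffices h : ∀ (s : List Int), (∀ k ∈ s, p k = false) →
      (vs.foldl PySem.Set.add s).find? p = (s ++ vs).find? p by
    simpa using h [] (by simp)
  induction vs with
  | nil => intro s hs; simp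
  | cons v rest ih =>
    intro s hs
    have hsnone : s.find? p = none := List.find?_eq_none.2 (fun x hx => by simp [hs x hx])
    simp only [List.foldl_cons]
    by_cases hc : v ∈ s
    · have hv : p v = false := hs v hc
      rw [set_add_mem s v hc, ih s hs, List.find?_append, List.find?_append, hsnone]
      simp [hv]
    · rw [set_add_not_mem s v hc]
      by_cases hv : p v = true
      · have hsv : (s ++ [v]).find? p = some v := by
          rw [List.find?_append, hsnone]; simp [hv]
        rw [find?_foldl_add_of_isSome rest (s ++ [v]) (by rw [hsv]; rfl), hsv,
          List.find?_append, hsnone]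
        simp [hv]
      · have hv' : p v = false := by simpa using hv
        have hall : ∀ k ∈ s ++ [v], p k = false := by
          intro k hk
          rcases List.mem_append.1 hk with h1 | h1
          · exact hs k h1
          · simp at h1; subst h1; exact hv'
        rw [ih (s ++ [v]) hall, List.append_assoc]
        rfl

-- B computes refSpec
theorem alt_eq_refSpec (v0 : Int) (tail : List (Int × Int)) :
    altSearch v0 (altGroups tail).items = refSpec v0 tail := by
  rw [PySem.Dict.items_eq_map_keys (altGroups tail) (altGroups_nodup_keys tail) []]
  rw [altSearch_map v0 _ (fun k => (altGroups tail).getD k [])]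
  rw [altGroups_keys, find?_dedup]
  rw [List.find?_map]
  unfold refSpec
  cases hf : tail.find? (fun p => decide (v0 < p.2)) with
  | none =>
    rw [show tail.find? ((fun k => decide (v0 < k)) ∘ (fun p : Int × Int => p.2))
        = none from hf]
    simp
  | some x =>
    rw [show tail.find? ((fun k => decide (v0 < k)) ∘ (fun p : Int × Int => p.2))
        = some x from hf]
    simp [altGroups_getD]

-- ===== VERDICT (by name: the statement is the Claim_ definition above) =====
theorem findTheSecondLower_spec : Claim_equal_findTheSecondLower := by
  intro s _ hpre
  unfold Spec_findTheSecondLower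
  match s with
  | [] => exact absurd rfl hpre
  | f :: tail =>
    simp only [findTheSecondLower, findTheSecondLower_alt]
    rw [loop_unstarted, alt_eq_refSpec]
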